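/-
  WHAT THE CODEBOOK PREDICATES ARE BUILT FROM (documentation of the whole unit: the header of Vorbis/Codebook.lean).
  The block vocabulary (`Blk`, `BlkOK`, `BlkLive`, `Site`, `Block.Kept`, `ObjEq`) is NOT here: it is Vorbis/Blocks.lean, shared by
  every unit. This file holds only what is particular to the codebook region:

      ZeroFill mem a n        the `n` bytes at `a` are 0 (what `memset(p, 0, n)` leaves); every typed read inside is 0
      countBelow P n          how many `j < n` satisfy `P`: the counts `total` and `sorted_count` of the codebook loop
      BS x n se               the invariant of the two binary searches, with its step and exit lemmas
      mult_index_lt …         the index arithmetic of `multiplicands[z * dimensions + i]`, `elem_inside`, `and_1023_lt`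
      u8_eq_read, readLE_addr_succ     a byte / a little-endian read as the flat memory's one-byte reads
-/
import Vorbis.Fields
namespace Vorbis
open X86 X86.User Asan

/-! ### Bytes, and zero-filled memory -/

/-- The byte at `a` as the flat memory's one-byte read. -/
theorem u8_eq_read (mem : Mem) (a : Nat) : mem.u8 a = (mem.read (addr a)).toNat :=
  Mem.readLE_one mem (addr a)

/-- A little-endian read, one byte at a time, at a number address. -/
theorem readLE_addr_succ (mem : Mem) (a k : Nat) :
    mem.readLE (addr a) (k + 1) = mem.u8 a + 256 * mem.readLE (addr (a + 1)) k := by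
  rw [u8_eq_read, ← addr_add_one]
  rfl

/-- **The `n` bytes at `a` are 0**: what `memset(p, 0, n)` leaves (the codebooks block at line 3745, `sorted_values` by FIX 7). -/
def ZeroFill (mem : Mem) (a n : Nat) : Prop := ∀ j, j < n → mem.u8 (a + j) = 0

namespace ZeroFill

/-- A part of a zero-filled range is zero-filled. -/
theorem sub {mem : Mem} {a n : Nat} (h : ZeroFill mem a n) (b k : Nat) (h1 : a ≤ b) (h2 : b + k ≤ a + n) :
    ZeroFill mem b k := by
  intro j hj
  have e : b + j = a + (b - a + j) := by omega
  rw [e]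
  exact h _ (by omega)

/-- Any little-endian read inside a zero-filled range is 0. -/
theorem readLE {mem : Mem} {a n : Nat} (h : ZeroFill mem a n) (k : Nat) (hk : k ≤ n) : mem.readLE (addr a) k = 0 := by
  induction k generalizing a n with
  | zero => rfl
  | succ k ih =>
    rw [readLE_addr_succ]
    have h0 := h 0 (by omega)
    have hrest : ZeroFill mem (a + 1) (n - 1) := h.sub (a + 1) (n - 1) (by omega) (by omega)
    have e := ih hrest (by omega)
    rw [Nat.add_zero] at h0
    rw [h0, e]

/-- A byte inside a zero-filled range. -/
theorem u8 {mem : Mem} {a n : Nat} (h : ZeroFill mem a n) (b : Nat) (h1 : a ≤ b) (h2 : b + 1 ≤ a + n) : mem.u8 b = 0 :=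
  (h.sub b 1 h1 h2).readLE 1 (Nat.le_refl _)

/-- A `uint16` inside a zero-filled range. -/
theorem u16 {mem : Mem} {a n : Nat} (h : ZeroFill mem a n) (b : Nat) (h1 : a ≤ b) (h2 : b + 2 ≤ a + n) : mem.u16 b = 0 :=
  (h.sub b 2 h1 h2).readLE 2 (Nat.le_refl _)

/-- A `uint32` inside a zero-filled range. -/
theorem u32 {mem : Mem} {a n : Nat} (h : ZeroFill mem a n) (b : Nat) (h1 : a ≤ b) (h2 : b + 4 ≤ a + n) : mem.u32 b = 0 :=
  (h.sub b 4 h1 h2).readLE 4 (Nat.le_refl _)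

/-- A 64-bit value (a pointer: NULL) inside a zero-filled range. -/
theorem u64 {mem : Mem} {a n : Nat} (h : ZeroFill mem a n) (b : Nat) (h1 : a ≤ b) (h2 : b + 8 ≤ a + n) : mem.u64 b = 0 :=
  (h.sub b 8 h1 h2).readLE 8 (Nat.le_refl _)

/-- An `int16` inside a zero-filled range. -/
theorem i16 {mem : Mem} {a n : Nat} (h : ZeroFill mem a n) (b : Nat) (h1 : a ≤ b) (h2 : b + 2 ≤ a + n) : mem.i16 b = 0 := by
  rw [Mem.i16_def, h.u16 b h1 h2]
  rfl

/-- An `int` inside a zero-filled range. -/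
theorem i32 {mem : Mem} {a n : Nat} (h : ZeroFill mem a n) (b : Nat) (h1 : a ≤ b) (h2 : b + 4 ≤ a + n) : mem.i32 b = 0 := by
  rw [Mem.i32_def, h.u32 b h1 h2]
  rfl

/-- A pointer inside a zero-filled range is NULL. -/
theorem ptr {mem : Mem} {a n : Nat} (h : ZeroFill mem a n) (b : Nat) (h1 : a ≤ b) (h2 : b + 8 ≤ a + n) : mem.ptr b = 0 :=
  h.u64 b h1 h2

/-- **Frame**: a store that does not touch the range keeps it zero-filled. -/
theorem same {mem mem' : Mem} {a n : Nat} (h : ZeroFill mem a n) (hs : Mem.EqOn a (a + n) mem mem')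
    (hb : a + n ≤ 2 ^ 64) : ZeroFill mem' a n := by
  intro j hj
  rw [hs.u8 (a + j) (by omega) (by omega) hb]
  exact h j hj

/-- From the flat memory's bytes (the form a `memset` contract states). -/
theorem of_read {mem : Mem} {a n : Nat} (h : ∀ j, j < n → mem.read (addr (a + j)) = 0) : ZeroFill mem a n := by
  intro j hj
  rw [u8_eq_read, h j hj]
  rfl

end ZeroFill

/-! ### Counting -/

/-- How many `j < n` satisfy `P`. (`total` and `sorted_count` of the codebook loop are such counts of length bytes.) -/
def countBelow (P : Nat → Bool) : Nat → Nat
  | 0 => 0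
  | n + 1 => countBelow P n + (if P n then 1 else 0)

/-- One more index, which counts. -/
theorem countBelow_succ_true (P : Nat → Bool) (n : Nat) (h : P n = true) : countBelow P (n + 1) = countBelow P n + 1 := by
  simp only [countBelow, h, if_true]

/-- One more index, which does not count. -/
theorem countBelow_succ_false (P : Nat → Bool) (n : Nat) (h : P n = false) : countBelow P (n + 1) = countBelow P n := by
  simp only [countBelow, h, Bool.false_eq_true, if_false, Nat.add_zero]

/-- A count is at most the number of indices. -/
theorem countBelow_le (P : Nat → Bool) (n : Nat) : countBelow P n ≤ n := by
  induction n with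
  | zero => exact Nat.le_refl 0
  | succ n ih =>
    simp only [countBelow]
    split <;> omega

/-- Counting further never decreases the count. -/
theorem countBelow_mono (P : Nat → Bool) {i n : Nat} (h : i ≤ n) : countBelow P i ≤ countBelow P n := by
  induction n with
  | zero =>
    have e : i = 0 := by omega
    rw [e]
    exact Nat.le_refl _
  | succ n ih =>
    by_cases hi : i = n + 1
    · rw [hi]
      exact Nat.le_refl _
    · have := ih (by omega)
      simp only [countBelow]
      omega

/-- **An index that counts is numbered below the total**: if `i < n` counts, the count below `i` (the slot it is stored in:
`k++`, `m++`) is smaller than the count below `n` (the size of the table: `sorted_entries`). This is how CNT / CNT′ bound the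
stores `sorted_codewords[k++]` and `add_entry(…, m++, …)`. -/
theorem countBelow_lt_of (P : Nat → Bool) {i n : Nat} (hi : i < n) (hp : P i = true) : countBelow P i < countBelow P n := by
  have h1 : countBelow P (i + 1) = countBelow P i + 1 := countBelow_succ_true P i hp
  have h2 : countBelow P (i + 1) ≤ countBelow P n := countBelow_mono P hi
  omega

/-- Counts of predicates that agree below `n` agree. -/
theorem countBelow_congr {P Q : Nat → Bool} {n : Nat} (h : ∀ j, j < n → P j = Q j) : countBelow P n = countBelow Q n := by
  induction n with
  | zero => rfl
  | succ n ih =>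
    simp only [countBelow]
    rw [ih (fun j hj => h j (by omega)), h n (by omega)]

/-- Nothing counts: the count is 0. -/
theorem countBelow_eq_zero {P : Nat → Bool} {n : Nat} (h : ∀ j, j < n → P j = false) : countBelow P n = 0 := by
  induction n with
  | zero => rfl
  | succ n ih =>
    rw [countBelow_succ_false P n (h n (by omega))]
    exact ih (fun j hj => h j (by omega))

/-- Everything counts: the count is `n`. -/
theorem countBelow_eq_self {P : Nat → Bool} {n : Nat} (h : ∀ j, j < n → P j = true) : countBelow P n = n := by
  induction n with
  | zero => rfl
  | succ n ih =>
    rw [countBelow_succ_true P n (h n (by omega)), ih (fun j hj => h j (by omega))]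

/-- A stronger predicate counts fewer. -/
theorem countBelow_le_of_imp {P Q : Nat → Bool} {n : Nat} (h : ∀ j, j < n → P j = true → Q j = true) :
    countBelow P n ≤ countBelow Q n := by
  induction n with
  | zero => exact Nat.le_refl _
  | succ n ih =>
    have hrec := ih (fun j hj => h j (by omega))
    have hn := h n (by omega)
    simp only [countBelow]
    cases hp : P n with
    | false =>
      simp only [Bool.false_eq_true, if_false, Nat.add_zero]
      split <;> omega
    | true =>
      rw [hn hp]
      simp only [if_true]
      omega

/-! ### BS: the binary search of `compute_sorted_huffman` (line 1238) and `codebook_decode_scalar_raw` (line 1698)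

    x = 0; n = se;  while (n > 1) { m = x + (n >> 1); if (sorted_codewords[m] <= code) { x = m; n -= (n >> 1); } else n >>= 1; }

Safe by arithmetic alone: no property of the table's contents is used. `n >> 1` of a non-negative `int` is `n / 2`. -/

/-- **The invariant BS** (INVARIANTS §6): `0 ≤ x` (a `Nat`), `1 ≤ n`, `x + n ≤ se`. Termination measure: `n`. -/
structure BS (x n se : Nat) : Prop where
  pos : 1 ≤ n
  le : x + n ≤ se

namespace BS

/-- At the start `x = 0`, `n = se`; the search is only run for `se ≥ 1`. -/
theorem init {se : Nat} (h : 1 ≤ se) : BS 0 se se :=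
  ⟨h, by omega⟩

/-- **The probe `m = x + (n >> 1)` is inside the table** whenever the loop runs (`n > 1`). -/
theorem mid_lt {x n se : Nat} (h : BS x n se) (hn : 2 ≤ n) : x + n / 2 < se := by
  have := h.le
  omega

/-- The then-branch, `x = m; n -= n >> 1`: the invariant holds again (the sum `x + n` is unchanged). -/
theorem right {x n se : Nat} (h : BS x n se) (hn : 2 ≤ n) : BS (x + n / 2) (n - n / 2) se := by
  have := h.le
  exact ⟨by omega, by omega⟩

/-- The then-branch decreases the measure. -/
theorem right_lt {n : Nat} (hn : 2 ≤ n) : n - n / 2 < n := by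
  omega

/-- The else-branch, `n >>= 1`: the invariant holds again. -/
theorem left {x n se : Nat} (h : BS x n se) (hn : 2 ≤ n) : BS x (n / 2) se := by
  have := h.le
  exact ⟨by omega, by omega⟩

/-- The else-branch decreases the measure. -/
theorem left_lt {n : Nat} (hn : 2 ≤ n) : n / 2 < n := by
  omega

/-- **At the exit (`n ≤ 1`, so `n = 1`) the result is an index of the table**: `0 ≤ x < se`. -/
theorem exit {x n se : Nat} (h : BS x n se) : x < se := by
  have h1 := h.pos
  have h2 := h.le
  omega

/-- At the exit `n = 1`. -/
theorem exit_n {x n se : Nat} (h : BS x n se) (hn : n ≤ 1) : n = 1 := by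
  have := h.pos
  omega

/-- The machine's `sar r32, 1` of a non-negative value, and `shr`: the shift is the division. -/
theorem shiftRight_one (n : Nat) : n >>> 1 = n / 2 := by
  rw [Nat.shiftRight_eq_div_pow]

end BS

/-! ### Index arithmetic of `multiplicands[z * dimensions + i]`, and of the codebook array -/

/-- `z < N`, `i < d` ⇒ the element index `z * d + i` is below `N * d` (codebook_decode, _step, _deinterleave_repeat after
`z *= c->dimensions`; the type-1 expansion's `j * dimensions + k`). -/
theorem mult_index_lt {z N i d : Nat} (hz : z < N) (hi : i < d) : z * d + i < N * d := by
  have h := Nat.mul_le_mul_right d (Nat.succ_le_of_lt hz)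
  rw [Nat.succ_mul] at h
  omega

/-- The same for a run of `e ≤ d` elements (`effective` of codebook_decode_deinterleave_repeat): `z * d + e ≤ N * d`. -/
theorem mult_run_le {z N e d : Nat} (hz : z < N) (he : e ≤ d) : z * d + e ≤ N * d := by
  have h := Nat.mul_le_mul_right d (Nat.succ_le_of_lt hz)
  rw [Nat.succ_mul] at h
  omega

/-- With FIX 3's bound the byte offset of the element fits 32 bits with room to spare: no wrap in `imul` / `shl 2`. -/
theorem mult_offset_lt {z N i d : Nat} (hz : z < N) (hi : i < d) (hp : N * d ≤ 0x1FFFFFFF) :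
    4 * (z * d + i) + 4 ≤ 4 * (N * d) ∧ 4 * (z * d + i) + 4 ≤ 0x7FFFFFFC := by
  have := mult_index_lt hz hi
  omega

/-- `z * d` alone (the value of `z *= c->dimensions`) does not wrap either. -/
theorem mult_base_le {z N d : Nat} (hz : z < N) (hp : N * d ≤ 0x1FFFFFFF) : z * d ≤ 0x1FFFFFFF := by
  have h := Nat.mul_le_mul_right d (Nat.le_of_lt hz)
  omega

/-- A book stays sparse only when `total < entries >> 2` (line 3830, the conversion NOT taken); then `4·total < entries`: K2's last
half. -/
theorem quarter_lt {total entries : Nat} (h : total < entries / 4) : 4 * total < entries := by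
  omega

/-- Element `b` of an array of `count` structs of `size` bytes lies inside the array's block. -/
theorem elem_inside {b count size : Nat} (hb : b < count) : size * b + size ≤ size * count := by
  have h := Nat.mul_le_mul_left size (Nat.succ_le_of_lt hb)
  rw [Nat.mul_succ] at h
  exact h

/-- The index of the fast Huffman table, `acc & 1023`, is below 1024. -/
theorem and_1023_lt (acc : Nat) : acc &&& 1023 < 1024 := by
  have := @Nat.and_le_right acc 1023
  omega

end Vorbis
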